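-- pv_equiv track=rewrite | github.com/mkbabb/mdarray | mdarray_core/manipulation.py | ravel_internal
-- ===== SOURCE A (Python) =====
-- def ravel_internal(ix, mdim_ix_i, strides, size, mdim):
--     j = 0
--     while j < mdim:
--         stride = strides[mdim - (j + 1)]
--         k = 1
--
--         while True:
--             stride_k = stride*k
--             if stride_k >= ix:
--                 if stride != 1:
--                     k -= 1
--                 stride_k = stride*k
--                 break
--             else:
--                 k += 1
--
--         ix -= stride_k
--         mdim_ix_i[mdim - (j + 1)] = k
--         j += 1
--     return mdim_ix_i
-- ===== SOURCE B (Python) =====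
-- def ravel_internal(ix, mdim_ix_i, strides, size, mdim):
--     j = mdim - 1
--     while j >= 0:
--         stride = strides[j]
--         k = max(1, -(-ix // stride))  # smallest k >= 1 with stride*k >= ix, by ceiling division
--         if stride != 1:
--             k -= 1
--         ix -= stride * k
--         mdim_ix_i[j] = k
--         j -= 1
--     return mdim_ix_i
-- ===== Notes on version B (the rewrite author's own statement) =====
-- stated objective: alternative
-- what changed: The inner linear search for the smallest k with stride*k >= ix is replaced by a closed-form ceiling division, and the dimensions are walked with a direct descending index j instead of the j/mdim-(j+1) arithmetic.
-- outside the precondition, e.g. on ravel_internal(-5, [0], [0], 1, 1): A returns [0], B raises ZeroDivisionError; on ravel_internal(-5, [0], [-3], 1, 1): A returns [0], B returns [1]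
import Mathlib
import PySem

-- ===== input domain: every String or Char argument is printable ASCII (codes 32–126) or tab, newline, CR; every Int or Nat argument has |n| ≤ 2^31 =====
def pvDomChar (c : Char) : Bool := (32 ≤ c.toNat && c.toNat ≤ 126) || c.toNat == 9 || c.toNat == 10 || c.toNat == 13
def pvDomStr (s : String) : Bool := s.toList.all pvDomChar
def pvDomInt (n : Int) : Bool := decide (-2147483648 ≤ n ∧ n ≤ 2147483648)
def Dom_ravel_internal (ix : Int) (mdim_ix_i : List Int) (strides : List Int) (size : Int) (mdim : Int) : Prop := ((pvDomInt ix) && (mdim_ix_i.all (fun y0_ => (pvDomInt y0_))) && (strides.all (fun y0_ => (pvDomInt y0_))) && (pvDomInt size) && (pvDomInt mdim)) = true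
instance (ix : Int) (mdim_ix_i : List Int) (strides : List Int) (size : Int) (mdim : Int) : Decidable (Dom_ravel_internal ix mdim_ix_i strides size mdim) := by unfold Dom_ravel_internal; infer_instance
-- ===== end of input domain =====

-- B replaces A's inner linear stride-multiply search by a closed-form ceiling division
-- (objective: alternative). A mutates mdim_ix_i in place and returns it; B performs the
-- same in-place mutation, and the equivalence proved here is about the return value.


-- ===== PORT A =====
-- A's inner 'while True' search: from k, find the first k with stride*k >= ix, then
-- the 'if stride != 1: k -= 1' adjustment. Fuel makes it total; on Pre_ (stride >= 1)
-- fuel ix.toNat+2 is never exhausted.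
def raInner (stride ix : Int) : Nat → Int → Int
  | 0, k => k
  | fuel+1, k =>
    if stride * k ≥ ix then (if stride ≠ 1 then k - 1 else k)
    else raInner stride ix fuel (k + 1)

-- A's outer 'while j < mdim' loop; fuel mdim.toNat equals the number of iterations.
def raOuter (strides : List Int) (mdim : Int) : Nat → Int → Int → List Int → List Int
  | 0, _, _, arr => arr
  | fuel+1, j, ix, arr =>
    if j < mdim then
      let idx := mdim - (j + 1)
      let stride := PySem.List.pyGetD strides idx 0
      let k := raInner stride ix (ix.toNat + 2) 1
      let strideK := stride * k
      raOuter strides mdim fuel (j + 1) (ix - strideK) (PySem.List.pySetD arr idx k)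
    else arr

def ravel_internal (ix : Int) (mdim_ix_i : List Int) (strides : List Int) (size : Int) (mdim : Int) : List Int :=
  raOuter strides mdim mdim.toNat 0 ix mdim_ix_i

-- ===== PORT B =====
-- B's 'while j >= 0' loop counting down; fuel mdim.toNat equals the number of iterations.
def raAltLoop (strides : List Int) : Nat → Int → Int → List Int → List Int
  | 0, _, _, arr => arr
  | fuel+1, j, ix, arr =>
    if 0 ≤ j then
      let stride := PySem.List.pyGetD strides j 0
      let k0 := max 1 (-(PySem.Int.floordiv (-ix) stride))
      let k := if stride ≠ 1 then k0 - 1 else k0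
      raAltLoop strides fuel (j - 1) (ix - stride * k) (PySem.List.pySetD arr j k)
    else arr

def ravel_internal_alt (ix : Int) (mdim_ix_i : List Int) (strides : List Int) (size : Int) (mdim : Int) : List Int :=
  raAltLoop strides mdim.toNat (mdim - 1) ix mdim_ix_i

-- ===== PRECONDITION & SPEC =====
-- Pre_ excludes inputs where A raises IndexError (mdim exceeding a list length) and inputs
-- with a nonpositive stride among the first mdim strides: on those A diverges whenever the
-- running ix exceeds that stride and otherwise returns an accidental 0 entry from leftover
-- loop state, while B's ceiling division raises ZeroDivisionError or returns another value.
def Pre_ravel_internal (ix : Int) (mdim_ix_i : List Int) (strides : List Int) (size : Int) (mdim : Int) : Prop :=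
  mdim ≤ (strides.length : Int) ∧ mdim ≤ (mdim_ix_i.length : Int) ∧
  ∀ s ∈ strides.take mdim.toNat, 1 ≤ s
instance (ix : Int) (mdim_ix_i : List Int) (strides : List Int) (size : Int) (mdim : Int) : Decidable (Pre_ravel_internal ix mdim_ix_i strides size mdim) := by unfold Pre_ravel_internal; infer_instance

def pvWitness_ravel_internal : Int × List Int × List Int × Int × Int := (7, [0, 0], [4, 1], 8, 2)

def Spec_ravel_internal (ix : Int) (mdim_ix_i : List Int) (strides : List Int) (size : Int) (mdim : Int) (out : List Int) : Prop := out = ravel_internal_alt ix mdim_ix_i strides size mdim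
instance (ix : Int) (mdim_ix_i : List Int) (strides : List Int) (size : Int) (mdim : Int) (out : List Int) : Decidable (Spec_ravel_internal ix mdim_ix_i strides size mdim out) := by unfold Spec_ravel_internal; infer_instance

-- ===== CLAIM (what is proved, stated in full; the proofs are below) =====
def Claim_equal_ravel_internal : Prop := ∀ (ix : Int) (mdim_ix_i : List Int) (strides : List Int) (size : Int) (mdim : Int), Dom_ravel_internal ix mdim_ix_i strides size mdim → Pre_ravel_internal ix mdim_ix_i strides size mdim → Spec_ravel_internal ix mdim_ix_i strides size mdim (ravel_internal ix mdim_ix_i strides size mdim)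

-- ===== LEMMAS AND PROOFS =====

-- For stride ≥ 1 and k ≥ 1: stride*k ≥ ix ↔ k ≥ max 1 (ceil(ix/stride)).
theorem stride_ge_iff (stride ix k : Int) (hs : 1 ≤ stride) (hk : 1 ≤ k) :
    stride * k ≥ ix ↔ max 1 (-(PySem.Int.floordiv (-ix) stride)) ≤ k := by
  have h := (PySem.Int.neg_floordiv_neg_eq_iff_of_pos (a := ix) (b := stride)
      (q := -(PySem.Int.floordiv (-ix) stride)) (by omega)).mp rfl
  set c := -(PySem.Int.floordiv (-ix) stride) with hc
  constructor
  · intro hge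
    by_contra hlt
    push_neg at hlt
    have hkc : k ≤ c - 1 := by omega
    have : stride * k ≤ stride * (c - 1) := by
      exact mul_le_mul_of_nonneg_left hkc (by omega)
    nlinarith [h.1]
  · intro hle
    have hck : c ≤ k := le_trans (le_max_right _ _) hle
    have : stride * c ≤ stride * k := mul_le_mul_of_nonneg_left hck (by omega)
    nlinarith [h.2]

-- A's inner search computes the closed form, given enough fuel.
theorem raInner_eq (stride ix : Int) (hs : 1 ≤ stride) :
    ∀ (fuel : Nat) (k : Int), 1 ≤ k → k ≤ max 1 (-(PySem.Int.floordiv (-ix) stride)) →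
      (max 1 (-(PySem.Int.floordiv (-ix) stride)) - k).toNat < fuel →
      raInner stride ix fuel k =
        (if stride ≠ 1 then max 1 (-(PySem.Int.floordiv (-ix) stride)) - 1
         else max 1 (-(PySem.Int.floordiv (-ix) stride))) := by
  intro fuel
  induction fuel with
  | zero => intro k _ _ hf; omega
  | succ f ih =>
    intro k hk1 hkle hf
    rw [raInner]
    by_cases hge : stride * k ≥ ix
    · have := (stride_ge_iff stride ix k hs hk1).mp hge
      have hkeq : k = max 1 (-(PySem.Int.floordiv (-ix) stride)) := by omega
      subst hkeq
      rw [if_pos hge]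
    · simp only [hge, if_false]
      have hlt : ¬ (max 1 (-(PySem.Int.floordiv (-ix) stride)) ≤ k) := by
        intro h; exact hge ((stride_ge_iff stride ix k hs hk1).mpr h)
      exact ih (k + 1) (by omega) (by omega) (by omega)

-- The fuel ix.toNat + 2 suffices from k = 1.
theorem raInner_closed (stride ix : Int) (hs : 1 ≤ stride) :
    raInner stride ix (ix.toNat + 2) 1 =
      (if stride ≠ 1 then max 1 (-(PySem.Int.floordiv (-ix) stride)) - 1
       else max 1 (-(PySem.Int.floordiv (-ix) stride))) := by
  have h := (PySem.Int.neg_floordiv_neg_eq_iff_of_pos (a := ix) (b := stride)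
      (q := -(PySem.Int.floordiv (-ix) stride)) (by omega)).mp rfl
  set c := -(PySem.Int.floordiv (-ix) stride) with hc
  have hbound : max 1 c ≤ ix.toNat + 2 := by
    rcases le_or_gt c 1 with hcle | hcgt
    · omega
    · have h1 : (1 : Int) ≤ c - 1 := by omega
      have : c - 1 ≤ (c - 1) * stride := le_mul_of_one_le_right (by omega) hs
      have := h.1
      omega
  exact raInner_eq stride ix hs (ix.toNat + 2) 1 (by omega) (le_max_left _ _) (by omega)

-- The two loops visit the same indices mdim-1, …, 0 with the same state.
theorem loops_eq (strides : List Int) (mdim : Int)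
    (hlen : mdim ≤ (strides.length : Int))
    (hpos : ∀ s ∈ strides.take mdim.toNat, 1 ≤ s) :
    ∀ (fuel : Nat) (j ix : Int) (arr : List Int), 0 ≤ j → j + (fuel : Int) = mdim →
      raOuter strides mdim fuel j ix arr = raAltLoop strides fuel (mdim - j - 1) ix arr := by
  intro fuel
  induction fuel with
  | zero => intro j ix arr _ _; rfl
  | succ f ih =>
    intro j ix arr hj hjm
    have hjlt : j < mdim := by push_cast at hjm ⊢; omega
    rw [raOuter, raAltLoop]
    have hidx0 : (0:Int) ≤ mdim - j - 1 := by omega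
    rw [if_pos hjlt, if_pos hidx0]
    have hidxeq : mdim - (j + 1) = mdim - j - 1 := by ring
    -- the stride at index mdim-j-1 is ≥ 1
    have hidxlt : (mdim - j - 1).toNat < strides.length := by omega
    have hstride : 1 ≤ PySem.List.pyGetD strides (mdim - j - 1) 0 := by
      rw [PySem.List.pyGetD_eq_getElem strides (i := mdim - j - 1) 0 hidx0 (by push_cast; omega)]
      apply hpos
      have hmem : (strides.take mdim.toNat)[(mdim - j - 1).toNat]'(by
          simp [List.length_take]; omega) ∈ strides.take mdim.toNat :=
        List.getElem_mem _
      rwa [List.getElem_take] at hmem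
    simp only [hidxeq]
    rw [raInner_closed _ ix hstride]
    by_cases h1 : PySem.List.pyGetD strides (mdim - j - 1) 0 ≠ 1
    · simp only [h1, if_true, if_pos h1]
      rw [ih (j + 1) _ _ (by omega) (by push_cast at hjm ⊢; omega)]
      ring_nf
    · simp only [h1, if_false, if_neg h1]
      rw [ih (j + 1) _ _ (by omega) (by push_cast at hjm ⊢; omega)]
      ring_nf

-- ===== VERDICT (by name: the statement is the Claim_ definition above) =====
theorem ravel_internal_spec : Claim_equal_ravel_internal := by
  intro ix mdim_ix_i strides size mdim _ hpre
  unfold Spec_ravel_internal ravel_internal ravel_internal_alt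
  rcases hpre with ⟨hlen, _, hpos⟩
  rcases le_or_gt mdim 0 with hm | hm
  · have : mdim.toNat = 0 := by omega
    rw [this]; rfl
  · have := loops_eq strides mdim hlen hpos mdim.toNat 0 ix mdim_ix_i le_rfl (by omega)
    simpa using this
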